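-- pv_equiv track=rewrite | github.com/pypi-data/pypi-mirror-402 | packages/pbir-utils/pbir_utils-2.0.2.tar.gz/pbir_utils-2.0.2/src/pbir_utils/pbir_measure_utils.py | _get_all_used_measures
-- ===== SOURCE A (Python) =====
-- def _get_all_dependents_from_graph(
--     measure: str, dep_graph: dict, visited: set = None
-- ) -> set:
--     """
--     Get all direct and indirect dependents using pre-built dependency graph.
--
--     Args:
--         measure (str): The measure to find dependents for.
--         dep_graph (dict): Pre-built dependency graph from _build_dependency_graph.
--         visited (set, optional): Set to track visited measures during recursion.
--
--     Returns:
--         set: All measures (direct and indirect) that depend on this measure.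
--     """
--     visited = visited or set()
--     if measure in visited:
--         return set()
--     visited.add(measure)
--
--     direct = dep_graph.get(measure, set())
--     return direct.union(
--         *(_get_all_dependents_from_graph(d, dep_graph, visited) for d in direct)
--     )
--
-- def _get_all_used_measures(
--     measures_dict: dict, used_in_visuals: set, dep_graph: dict
-- ) -> set:
--     """
--     Get all measures that are used directly or indirectly in a single pass.
--
--     This function computes the transitive closure of measure usage:
--     a measure is "used" if it's directly used in visuals, OR if any of its
--     dependents are used in visuals.
--
--     Args:
--         measures_dict (dict): A dictionary of all measures with names as keys.
--         used_in_visuals (set): Pre-computed set of measures used in visuals.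
--         dep_graph (dict): Pre-built dependency graph from _build_dependency_graph.
--
--     Returns:
--         set: All measures that are used directly or indirectly.
--     """
--     all_used = set()
--     for measure in measures_dict:
--         if measure in used_in_visuals:
--             all_used.add(measure)
--             continue
--         # Check if any dependent is used
--         all_dependents = _get_all_dependents_from_graph(measure, dep_graph)
--         if any(dep in used_in_visuals for dep in all_dependents):
--             all_used.add(measure)
--     return all_used
-- ===== SOURCE B (Python) =====
-- def _get_all_used_measures(measures_dict, used_in_visuals, dep_graph):
--     # Saturation over the dependency graph: repeatedly mark any measure one of
--     # whose direct dependents is already marked; stop when a pass changes nothing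
--     # (at most len(dep_graph) passes are ever needed).
--     marked = set(used_in_visuals)
--     for _ in range(len(dep_graph)):
--         changed = False
--         for src, deps in dep_graph.items():
--             if src not in marked and not marked.isdisjoint(deps):
--                 marked.add(src)
--                 changed = True
--         if not changed:
--             break
--     return {m for m in measures_dict if m in marked}
-- ===== Notes on version B (the rewrite author's own statement) =====
-- stated objective: alternative
-- what changed: A runs a fresh recursive DFS over the dependency graph for every single measure; B instead computes the set of measures that transitively reach used_in_visuals once, by saturation passes over dep_graph with early exit at the fixpoint, then filters measures_dict against that one marked set.
import Mathlib
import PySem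

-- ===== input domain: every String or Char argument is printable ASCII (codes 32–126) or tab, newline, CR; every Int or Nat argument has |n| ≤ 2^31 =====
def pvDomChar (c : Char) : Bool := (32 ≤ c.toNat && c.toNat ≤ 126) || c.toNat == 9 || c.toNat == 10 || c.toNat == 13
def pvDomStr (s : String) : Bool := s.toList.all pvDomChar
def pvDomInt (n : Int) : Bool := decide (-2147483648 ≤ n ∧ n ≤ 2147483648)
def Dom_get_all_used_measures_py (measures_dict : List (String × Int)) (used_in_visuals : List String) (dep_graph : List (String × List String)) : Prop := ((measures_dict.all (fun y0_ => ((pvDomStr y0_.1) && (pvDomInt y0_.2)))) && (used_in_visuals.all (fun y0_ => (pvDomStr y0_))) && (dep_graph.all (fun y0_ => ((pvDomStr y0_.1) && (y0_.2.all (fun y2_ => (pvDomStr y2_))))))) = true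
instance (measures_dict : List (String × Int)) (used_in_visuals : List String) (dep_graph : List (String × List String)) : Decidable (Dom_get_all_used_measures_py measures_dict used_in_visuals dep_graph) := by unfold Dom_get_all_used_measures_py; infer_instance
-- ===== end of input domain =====

-- B replaces A's per-measure recursive DFS by one saturation of the "reaches used_in_visuals"
-- marked set over dep_graph (at most |dep_graph| passes, early exit), then a single filter.

-- ===== PORT A =====
-- dep_graph.get(measure, set())  (the dict argument arrives as its pair list)
def pvDirect (g : List (String × List String)) (m : String) : List String :=
  ((PySem.Dict.ofList g).get? m).getD []

-- _get_all_dependents_from_graph, with the shared mutable `visited` threaded through the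
-- sibling recursion; the Nat argument is only a fuel guard making the recursion total
-- (pvFuelA is proved never to run out, inside pvDfsA_spec below)
def pvDfsA (g : List (String × List String)) : Nat → String → List String → List String × List String
  | 0, _, vis => ([], vis)
  | f + 1, m, vis =>
    if m ∈ vis then ([], vis)
    else
      let vis1 := PySem.Set.add vis m
      let direct := pvDirect g m
      direct.foldl (fun p d =>
        let q := pvDfsA g f d p.2
        (PySem.Set.union p.1 q.1, q.2)) (direct, vis1)

def pvFuelA (g : List (String × List String)) : Nat := (g.flatMap (·.2)).length + 2

def get_all_used_measures_py (measures_dict : List (String × Int)) (used_in_visuals : List String) (dep_graph : List (String × List String)) : List String :=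
  (PySem.Dict.ofList measures_dict).keys.foldl (fun all_used m =>
    if m ∈ used_in_visuals then PySem.Set.add all_used m
    else if ((pvDfsA dep_graph (pvFuelA dep_graph) m []).1).any (fun d => decide (d ∈ used_in_visuals)) = true then
      PySem.Set.add all_used m
    else all_used) []

-- ===== PORT B =====
-- one pass of Source B's inner loop over dep_graph.items(): (new marked, changed)
def pvPassB (items : List (String × List String)) (mk : List String) : List String × Bool :=
  items.foldl (fun p sd =>
    if sd.1 ∉ p.1 ∧ PySem.Set.isdisjoint p.1 sd.2 = false then (p.1 ++ [sd.1], true) else p) (mk, false)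

-- Source B's outer loop: at most len(dep_graph) passes, stopping once a pass changes nothing
def pvSatB (items : List (String × List String)) : Nat → List String → List String
  | 0, mk => mk
  | n + 1, mk =>
    let q := pvPassB items mk
    if q.2 then pvSatB items n q.1 else q.1

def get_all_used_measures_py_alt (measures_dict : List (String × Int)) (used_in_visuals : List String) (dep_graph : List (String × List String)) : List String :=
  let items := (PySem.Dict.ofList dep_graph).items
  let marked := pvSatB items items.length (PySem.Set.ofList used_in_visuals)
  PySem.Set.ofList ((PySem.Dict.ofList measures_dict).keys.filter (fun m => decide (m ∈ marked)))

-- ===== PRECONDITION & SPEC =====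
def Spec_get_all_used_measures_py (measures_dict : List (String × Int)) (used_in_visuals : List String) (dep_graph : List (String × List String)) (out : List String) : Prop := out = get_all_used_measures_py_alt measures_dict used_in_visuals dep_graph
instance (measures_dict : List (String × Int)) (used_in_visuals : List String) (dep_graph : List (String × List String)) (out : List String) : Decidable (Spec_get_all_used_measures_py measures_dict used_in_visuals dep_graph out) := by unfold Spec_get_all_used_measures_py; infer_instance

-- ===== CLAIM (what is proved, stated in full; the proofs are below) =====
def Claim_equal_get_all_used_measures_py : Prop := ∀ (measures_dict : List (String × Int)) (used_in_visuals : List String) (dep_graph : List (String × List String)), Dom_get_all_used_measures_py measures_dict used_in_visuals dep_graph → Spec_get_all_used_measures_py measures_dict used_in_visuals dep_graph (get_all_used_measures_py measures_dict used_in_visuals dep_graph)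

-- ===== LEMMAS AND PROOFS =====

lemma pv_update_items_vals {pairs : List (String × List String)} :
    ∀ (d : PySem.Dict String (List String)) (p : String × List String),
      p ∈ (d.update pairs).items → p ∈ d.items ∨ p.2 ∈ pairs.map (·.2) := by
  induction pairs with
  | nil => intro d p h; exact Or.inl h
  | cons a t ih =>
    intro d p h
    have : PySem.Dict.update d (a :: t) = PySem.Dict.update (d.insert a.1 a.2) t := rfl
    rw [this] at h
    rcases ih _ _ h with h1 | h1
    · rw [PySem.Dict.mem_items_insert] at h1
      rcases h1 with rfl | ⟨h2, _⟩
      · exact Or.inr (by simp)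
      · exact Or.inl h2
    · exact Or.inr (by simp [h1])

lemma pv_get?_ofList_mem_values {g : List (String × List String)} {m : String} {v : List String}
    (h : (PySem.Dict.ofList g).get? m = some v) : v ∈ g.map (·.2) := by
  have hm := PySem.Dict.mem_items_of_get?_eq_some _ h
  have := pv_update_items_vals (pairs := g) PySem.Dict.empty (m, v) hm
  simpa [PySem.Dict.empty] using this

def pvUniv (g : List (String × List String)) : List String := g.flatMap (·.2)

def pvNu (g : List (String × List String)) (vis : List String) : Nat :=
  ((pvUniv g).toFinset \ vis.toFinset).card

lemma pv_direct_subset_univ (g : List (String × List String)) (m : String) :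
    ∀ d ∈ pvDirect g m, d ∈ pvUniv g := by
  intro d hd
  unfold pvDirect at hd
  cases h : (PySem.Dict.ofList g).get? m with
  | none => rw [h] at hd; simp at hd
  | some v =>
    rw [h] at hd; simp at hd
    have hv := pv_get?_ofList_mem_values h
    rcases List.mem_map.mp hv with ⟨p, hp, rfl⟩
    exact List.mem_flatMap.mpr ⟨p, hp, hd⟩

lemma pvNu_mono {g : List (String × List String)} {vis vis' : List String}
    (h : ∀ x ∈ vis, x ∈ vis') : pvNu g vis' ≤ pvNu g vis := by
  apply Finset.card_le_card
  intro x hx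
  simp only [Finset.mem_sdiff, List.mem_toFinset] at *
  exact ⟨hx.1, fun hc => hx.2 (h x hc)⟩

lemma pvNu_add_lt {g : List (String × List String)} {vis : List String} {m : String}
    (hm : m ∈ pvUniv g) (hv : m ∉ vis) : pvNu g (vis ++ [m]) < pvNu g vis := by
  apply Finset.card_lt_card
  constructor
  · intro x hx
    simp only [Finset.mem_sdiff, List.mem_toFinset, List.mem_append, List.mem_singleton] at *
    exact ⟨hx.1, fun hc => hx.2 (Or.inl hc)⟩
  · intro hsub
    have : m ∈ (pvUniv g).toFinset \ vis.toFinset := by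
      simp only [Finset.mem_sdiff, List.mem_toFinset]; exact ⟨hm, hv⟩
    have h2 := hsub this
    simp only [Finset.mem_sdiff, List.mem_toFinset, List.mem_append, List.mem_singleton] at h2
    simp at h2

lemma pv_foldl_add_filter (c1 c2 : String → Prop) [DecidablePred c1] [DecidablePred c2] :
    ∀ (l acc : List String), l.Nodup → (∀ x ∈ l, x ∉ acc) →
      l.foldl (fun a m => if c1 m then PySem.Set.add a m
                          else if c2 m then PySem.Set.add a m else a) acc
        = acc ++ l.filter (fun m => decide (c1 m) || decide (c2 m)) := by
  intro l
  induction l with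
  | nil => intro acc _ _; simp
  | cons x t ih =>
    intro acc hnd hfr
    have hx : x ∉ acc := hfr x (by simp)
    have hnd' := (List.nodup_cons.mp hnd).2
    have hxt : x ∉ t := (List.nodup_cons.mp hnd).1
    by_cases h1 : c1 x
    · have : PySem.Set.add acc x = acc ++ [x] := PySem.Set.add_of_not_mem hx
      simp only [List.foldl_cons, if_pos h1, this]
      rw [ih (acc ++ [x]) hnd' (by intro y hy; simp; exact ⟨fun hc => hfr y (by simp [hy]) hc, fun hc => hxt (hc ▸ hy)⟩)]
      simp [h1]
    · by_cases h2 : c2 x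
      · have : PySem.Set.add acc x = acc ++ [x] := PySem.Set.add_of_not_mem hx
        simp only [List.foldl_cons, if_neg h1, if_pos h2, this]
        rw [ih (acc ++ [x]) hnd' (by intro y hy; simp; exact ⟨fun hc => hfr y (by simp [hy]) hc, fun hc => hxt (hc ▸ hy)⟩)]
        simp [h1, h2]
      · simp only [List.foldl_cons, if_neg h1, if_neg h2]
        rw [ih acc hnd' (fun y hy => hfr y (by simp [hy]))]
        simp [h1, h2]

def pvStep (g : List (String × List String)) (a b : String) : Prop := b ∈ pvDirect g a

def pvReachU (g : List (String × List String)) (U : List String) (m : String) : Prop :=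
  ∃ u ∈ U, Relation.ReflTransGen (pvStep g) m u

-- the same pass with the disjointness test spelled as an existential
def pvPassE (items : List (String × List String)) (mk : List String) : List String × Bool :=
  items.foldl (fun p sd =>
    if sd.1 ∉ p.1 ∧ ∃ d ∈ sd.2, d ∈ p.1 then (p.1 ++ [sd.1], true) else p) (mk, false)

lemma pvCond_iff (s t : List String) :
    (PySem.Set.isdisjoint s t = false) ↔ ∃ d ∈ t, d ∈ s := by
  constructor
  · intro h
    by_contra hn
    push Not at hn
    have : PySem.Set.isdisjoint s t = true :=
      (PySem.Set.isdisjoint_iff s t).mpr (fun x hx hxt => hn x hxt hx)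
    rw [this] at h; cases h
  · rintro ⟨d, hd, hds⟩
    cases h : PySem.Set.isdisjoint s t
    · rfl
    · exact absurd hd ((PySem.Set.isdisjoint_iff s t).mp h d hds)

lemma pvPassB_eq (items : List (String × List String)) (mk : List String) :
    pvPassB items mk = pvPassE items mk := by
  unfold pvPassB pvPassE
  congr 1
  funext p sd
  rw [if_congr (and_congr_right fun _ => pvCond_iff p.1 sd.2) rfl rfl]

lemma pvPass_general (items : List (String × List String)) :
    ∀ (st : List String × Bool),
      ∃ ext, (items.foldl (fun p sd =>
          if sd.1 ∉ p.1 ∧ ∃ d ∈ sd.2, d ∈ p.1 then (p.1 ++ [sd.1], true) else p) st)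
        = (st.1 ++ ext, st.2 || decide (ext ≠ [])) ∧
        (∀ x ∈ ext, x ∈ items.map (·.1) ∧ x ∉ st.1) := by
  induction items with
  | nil => intro st; exact ⟨[], by simp, by simp⟩
  | cons a t ih =>
    intro st
    by_cases hc : a.1 ∉ st.1 ∧ ∃ d ∈ a.2, d ∈ st.1
    · obtain ⟨ext, he, hm⟩ := ih (st.1 ++ [a.1], true)
      refine ⟨a.1 :: ext, ?_, ?_⟩
      · simp only [List.foldl_cons, if_pos hc]
        rw [he]; simp
      · intro x hx
        rcases List.mem_cons.mp hx with rfl | hx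
        · exact ⟨by simp, hc.1⟩
        · obtain ⟨h1, h2⟩ := hm x hx
          simp only [List.mem_append, List.mem_singleton, not_or] at h2
          exact ⟨by simp [h1], h2.1⟩
    · obtain ⟨ext, he, hm⟩ := ih st
      refine ⟨ext, ?_, ?_⟩
      · simp only [List.foldl_cons, if_neg hc]; exact he
      · intro x hx; have := hm x hx; exact ⟨by simp [this.1], this.2⟩

lemma pvPassB_spec (items : List (String × List String)) (mk : List String) :
    ∃ ext, (pvPassB items mk).1 = mk ++ ext ∧
      (∀ x ∈ ext, x ∈ items.map (·.1) ∧ x ∉ mk) ∧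
      ((pvPassB items mk).2 = false → ext = []) ∧
      ((pvPassB items mk).2 = true → ext ≠ []) := by
  obtain ⟨ext, he, hm⟩ := pvPass_general items (mk, false)
  refine ⟨ext, by rw [pvPassB_eq, pvPassE, he], hm, ?_, ?_⟩ <;>
    rw [pvPassB_eq, pvPassE, he] <;> simp

lemma pvPassE_false (items : List (String × List String)) :
    ∀ (mk : List String), (pvPassE items mk).2 = false →
    ∀ sd ∈ items, sd.1 ∈ mk ∨ ∀ d ∈ sd.2, d ∉ mk := by
  induction items with
  | nil => intro mk _ sd h; simp at h
  | cons a t ih =>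
    intro mk hf sd hsd
    by_cases hc : a.1 ∉ mk ∧ ∃ d ∈ a.2, d ∈ mk
    · exfalso
      have : pvPassE (a :: t) mk
          = t.foldl (fun p sd => if sd.1 ∉ p.1 ∧ ∃ d ∈ sd.2, d ∈ p.1 then (p.1 ++ [sd.1], true) else p) (mk ++ [a.1], true) := by
        rw [pvPassE]; simp only [List.foldl_cons, if_pos hc]
      obtain ⟨ext, he, _⟩ := pvPass_general t (mk ++ [a.1], true)
      rw [this, he] at hf; simp at hf
    · have hstep : pvPassE (a :: t) mk = pvPassE t mk := by
        rw [pvPassE, pvPassE]; simp only [List.foldl_cons, if_neg hc]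
      rw [hstep] at hf
      rcases List.mem_cons.mp hsd with rfl | hsd
      · push Not at hc
        by_cases ha : sd.1 ∈ mk
        · exact Or.inl ha
        · exact Or.inr (hc ha)
      · exact ih mk hf sd hsd

lemma pvPassB_false (items : List (String × List String)) (mk : List String)
    (h : (pvPassB items mk).2 = false) :
    ∀ sd ∈ items, sd.1 ∈ mk ∨ ∀ d ∈ sd.2, d ∉ mk :=
  pvPassE_false items mk (by rw [← pvPassB_eq]; exact h)

lemma pvStep_of_items {g : List (String × List String)} {sd : String × List String}
    (h : sd ∈ (PySem.Dict.ofList g).items) : ∀ d ∈ sd.2, pvStep g sd.1 d := by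
  intro d hd
  have hk : (PySem.Dict.ofList g).keys.Nodup := PySem.Dict.nodup_keys_ofList g
  have := PySem.Dict.get?_of_mem_items (k := sd.1) (v := sd.2) _ (by simpa using h) hk
  unfold pvStep pvDirect
  rw [this]; simpa using hd

lemma pvPass_sound_general (g : List (String × List String)) (U : List String) :
    ∀ (items : List (String × List String)) (st : List String × Bool),
      (∀ p ∈ items, ∀ d ∈ p.2, pvStep g p.1 d) →
      (∀ x ∈ st.1, pvReachU g U x) →
      ∀ x ∈ (items.foldl (fun p sd =>
          if sd.1 ∉ p.1 ∧ ∃ d ∈ sd.2, d ∈ p.1 then (p.1 ++ [sd.1], true) else p) st).1,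
        pvReachU g U x := by
  intro items
  induction items with
  | nil => intro st _ hInv x hx; exact hInv x hx
  | cons a t ih =>
    intro st hstep hInv x hx
    simp only [List.foldl_cons] at hx
    by_cases hc : a.1 ∉ st.1 ∧ ∃ d ∈ a.2, d ∈ st.1
    · rw [if_pos hc] at hx
      refine ih _ (fun sd hsd => hstep sd (by simp [hsd])) ?_ x hx
      intro y hy
      rcases List.mem_append.mp hy with hy | hy
      · exact hInv y hy
      · obtain ⟨d, hd, hdm⟩ := hc.2
        obtain ⟨u, hu, hr⟩ := hInv d hdm
        have : y = a.1 := by simpa using hy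
        subst this
        exact ⟨u, hu, Relation.ReflTransGen.head (hstep a (by simp) d hd) hr⟩
    · rw [if_neg hc] at hx
      exact ih _ (fun sd hsd => hstep sd (by simp [hsd])) hInv x hx

lemma pvPassB_sound (g : List (String × List String)) (U : List String)
    (mk : List String) (hInv : ∀ x ∈ mk, pvReachU g U x) :
    ∀ x ∈ (pvPassB (PySem.Dict.ofList g).items mk).1, pvReachU g U x := by
  rw [pvPassB_eq]
  exact pvPass_sound_general g U _ (mk, false) (fun sd hsd => pvStep_of_items hsd) hInv

lemma pvSatB_mem_mono (items : List (String × List String)) :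
    ∀ (n : Nat) (mk : List String) (x : String), x ∈ mk → x ∈ pvSatB items n mk := by
  intro n
  induction n with
  | zero => intro mk x hx; exact hx
  | succ n ih =>
    intro mk x hx
    obtain ⟨ext, he, _, _, _⟩ := pvPassB_spec items mk
    rw [pvSatB]
    by_cases h2 : (pvPassB items mk).2
    · simp only [h2, if_pos]
      exact ih _ x (by rw [he]; exact List.mem_append_left _ hx)
    · simp only [h2]
      simp only [Bool.false_eq_true, if_false]
      rw [he]; exact List.mem_append_left _ hx

lemma pvSatB_sound (g : List (String × List String)) (U : List String) :
    ∀ (n : Nat) (mk : List String), (∀ x ∈ mk, pvReachU g U x) →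
      ∀ x ∈ pvSatB (PySem.Dict.ofList g).items n mk, pvReachU g U x := by
  intro n
  induction n with
  | zero => intro mk h x hx; exact h x hx
  | succ n ih =>
    intro mk h x hx
    rw [pvSatB] at hx
    by_cases h2 : (pvPassB (PySem.Dict.ofList g).items mk).2
    · simp only [h2, if_pos] at hx
      exact ih _ (pvPassB_sound g U mk h) x hx
    · simp only [h2, Bool.false_eq_true, if_false] at hx
      exact pvPassB_sound g U mk h x hx

lemma pvSatB_fix (items : List (String × List String)) :
    ∀ (n : Nat) (mk : List String),
      ((items.map (·.1)).toFinset \ mk.toFinset).card ≤ n →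
      (pvPassB items (pvSatB items n mk)).2 = false := by
  intro n
  induction n with
  | zero =>
    intro mk hcard
    have hall : ∀ sd ∈ items, sd.1 ∈ mk := by
      intro sd hsd
      by_contra hn
      have : sd.1 ∈ (items.map (·.1)).toFinset \ mk.toFinset := by
        simp only [Finset.mem_sdiff, List.mem_toFinset]
        exact ⟨List.mem_map.mpr ⟨sd, hsd, rfl⟩, hn⟩
      have := Finset.card_pos.mpr ⟨_, this⟩
      omega
    -- pass adds nothing: every key already marked, so every condition is false
    rw [pvSatB]
    obtain ⟨ext, he, hm, hf, ht⟩ := pvPassB_spec items mk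
    by_contra hb
    have h2 : (pvPassB items mk).2 = true := by
      cases h : (pvPassB items mk).2
      · exact absurd h hb
      · rfl
    obtain ⟨x, hx⟩ := List.exists_mem_of_ne_nil _ (ht h2)
    have := hm x hx
    rcases List.mem_map.mp this.1 with ⟨sd, hsd, rfl⟩
    exact this.2 (hall sd hsd)
  | succ n ih =>
    intro mk hcard
    rw [pvSatB]
    obtain ⟨ext, he, hf, ht⟩ := pvPassB_spec items mk
    by_cases h2 : (pvPassB items mk).2
    · simp only [h2, if_pos]
      apply ih
      -- the pass marked at least one new key: the unmarked-key count went down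
      obtain ⟨x, hx⟩ := List.exists_mem_of_ne_nil _ (ht.2 h2)
      have hxk := hf x hx
      have hsub : ((items.map (·.1)).toFinset \ (pvPassB items mk).1.toFinset)
          ⊆ ((items.map (·.1)).toFinset \ mk.toFinset).erase x := by
        intro y hy
        simp only [Finset.mem_sdiff, List.mem_toFinset, Finset.mem_erase] at hy ⊢
        constructor
        · rintro rfl
          exact hy.2 (by rw [he]; exact List.mem_append_right _ hx)
        · exact ⟨hy.1, fun hc => hy.2 (by rw [he]; exact List.mem_append_left _ hc)⟩
      have hxmem : x ∈ (items.map (·.1)).toFinset \ mk.toFinset := by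
        simp only [Finset.mem_sdiff, List.mem_toFinset]; exact ⟨hxk.1, hxk.2⟩
      calc ((items.map (·.1)).toFinset \ (pvPassB items mk).1.toFinset).card
          ≤ (((items.map (·.1)).toFinset \ mk.toFinset).erase x).card := Finset.card_le_card hsub
        _ = ((items.map (·.1)).toFinset \ mk.toFinset).card - 1 := Finset.card_erase_of_mem hxmem
        _ ≤ n := by omega
    · simp only [h2, Bool.false_eq_true, if_false]
      have hb : (pvPassB items mk).2 = false := by
        cases h : (pvPassB items mk).2
        · rfl
        · exact absurd h h2
      have hq : (pvPassB items mk).1 = mk := by rw [he, ht.1 hb]; simp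
      rw [hq]; exact hb

lemma pvMarked_iff (g : List (String × List String)) (U : List String) (m : String) :
    m ∈ pvSatB (PySem.Dict.ofList g).items (PySem.Dict.ofList g).items.length (PySem.Set.ofList U)
      ↔ pvReachU g U m := by
  constructor
  · intro hm
    refine pvSatB_sound g U _ _ ?_ m hm
    intro x hx
    exact ⟨x, (PySem.Set.mem_ofList _ _).mp hx, Relation.ReflTransGen.refl⟩
  · rintro ⟨u, hu, hr⟩
    have hfix := pvSatB_fix (PySem.Dict.ofList g).items (PySem.Dict.ofList g).items.length
      (PySem.Set.ofList U) (by
        calc (((PySem.Dict.ofList g).items.map (·.1)).toFinset \ (PySem.Set.ofList U).toFinset).card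
            ≤ ((PySem.Dict.ofList g).items.map (·.1)).toFinset.card := Finset.card_le_card (Finset.sdiff_subset)
          _ ≤ ((PySem.Dict.ofList g).items.map (·.1)).length := List.toFinset_card_le _
          _ = (PySem.Dict.ofList g).items.length := List.length_map _)
    have hstable := pvPassB_false _ _ hfix
    induction hr using Relation.ReflTransGen.head_induction_on with
    | refl =>
      exact pvSatB_mem_mono _ _ _ _ ((PySem.Set.mem_ofList _ _).mpr hu)
    | head hs _ ih =>
      rename_i x y _
      unfold pvStep pvDirect at hs
      cases hg : (PySem.Dict.ofList g).get? x with
      | none => rw [hg] at hs; simp at hs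
      | some v =>
        rw [hg] at hs; simp at hs
        have hit := PySem.Dict.mem_items_of_get?_eq_some _ hg
        rcases hstable (x, v) hit with h | h
        · exact h
        · exact absurd ih (h y hs)

def pvDfsOk (g : List (String × List String)) (m : String) (vis : List String)
    (out : List String × List String) : Prop :=
  (∃ new, out.2 = vis ++ new) ∧
  (∀ x ∈ out.1, Relation.TransGen (pvStep g) m x) ∧
  (∀ n ∈ out.2, n ∉ vis → n = m ∨ n ∈ out.1) ∧
  (∀ n ∈ out.2, n ∉ vis → ∀ y, pvStep g n y → y ∈ out.2) ∧
  (m ∈ out.2)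

def pvFoldOk (g : List (String × List String)) (ds acc vis : List String)
    (out : List String × List String) : Prop :=
  (∃ new, out.2 = vis ++ new) ∧
  (∀ x ∈ acc, x ∈ out.1) ∧
  (∀ x ∈ out.1, x ∈ acc ∨ ∃ d ∈ ds, Relation.TransGen (pvStep g) d x) ∧
  (∀ n ∈ out.2, n ∉ vis → (∃ d ∈ ds, n = d) ∨ n ∈ out.1) ∧
  (∀ n ∈ out.2, n ∉ vis → ∀ y, pvStep g n y → y ∈ out.2) ∧
  (∀ d ∈ ds, d ∈ out.2)

lemma pvDfsA_fold (g : List (String × List String)) (f : Nat)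
    (IH : ∀ (m : String) (vis : List String),
      (pvNu g vis + 2 ≤ f ∨ (m ∈ pvUniv g ∧ pvNu g vis + 1 ≤ f)) →
      pvDfsOk g m vis (pvDfsA g f m vis)) :
    ∀ (ds acc vis : List String), (∀ d ∈ ds, d ∈ pvUniv g) → pvNu g vis + 1 ≤ f →
      pvFoldOk g ds acc vis (ds.foldl (fun p d =>
        let q := pvDfsA g f d p.2
        (PySem.Set.union p.1 q.1, q.2)) (acc, vis)) := by
  intro ds
  induction ds with
  | nil =>
    intro acc vis _ _
    exact ⟨⟨[], by simp⟩, fun x hx => hx, fun x hx => Or.inl hx,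
      fun n hn hnv => absurd hn hnv, fun n hn hnv => absurd hn hnv, by simp⟩
  | cons d ds ih =>
    intro acc vis hds hν
    have hOk := IH d vis (Or.inr ⟨hds d (by simp), hν⟩)
    obtain ⟨⟨newq, hq2⟩, hqb, hqc, hqd, hqf⟩ := hOk
    have hvisq : ∀ x ∈ vis, x ∈ (pvDfsA g f d vis).2 := by
      intro x hx; rw [hq2]; exact List.mem_append_left _ hx
    have hν' : pvNu g (pvDfsA g f d vis).2 + 1 ≤ f :=
      le_trans (by have := pvNu_mono (g := g) hvisq; omega) hν
    have hrec := ih (PySem.Set.union acc (pvDfsA g f d vis).1) (pvDfsA g f d vis).2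
      (fun d' hd' => hds d' (by simp [hd'])) hν'
    obtain ⟨⟨newr, hr2⟩, hre, hrb, hrc, hrd, hrg⟩ := hrec
    simp only [List.foldl_cons]
    refine ⟨⟨newq ++ newr, by rw [hr2, hq2, List.append_assoc]⟩, ?_, ?_, ?_, ?_, ?_⟩
    · intro x hx
      exact hre x ((PySem.Set.mem_union _ _ _).mpr (Or.inl hx))
    · intro x hx
      rcases hrb x hx with hx' | ⟨d', hd', ht⟩
      · rcases (PySem.Set.mem_union _ _ _).mp hx' with h | h
        · exact Or.inl h
        · exact Or.inr ⟨d, by simp, hqb x h⟩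
      · exact Or.inr ⟨d', by simp [hd'], ht⟩
    · intro n hn hnv
      by_cases hnq : n ∈ (pvDfsA g f d vis).2
      · rcases hqc n hnq hnv with rfl | hnr
        · exact Or.inl ⟨n, by simp, rfl⟩
        · exact Or.inr (hre n ((PySem.Set.mem_union _ _ _).mpr (Or.inr hnr)))
      · rcases hrc n hn hnq with ⟨d', hd', rfl⟩ | hnr
        · exact Or.inl ⟨n, by simp [hd'], rfl⟩
        · exact Or.inr hnr
    · intro n hn hnv y hy
      by_cases hnq : n ∈ (pvDfsA g f d vis).2
      · have : y ∈ (pvDfsA g f d vis).2 := hqd n hnq hnv y hy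
        rw [hr2]; exact List.mem_append_left _ this
      · exact hrd n hn hnq y hy
    · intro d' hd'
      rcases List.mem_cons.mp hd' with rfl | hd'
      · rw [hr2]; exact List.mem_append_left _ hqf
      · exact hrg d' hd'

lemma pvDfsA_spec (g : List (String × List String)) :
    ∀ (f : Nat) (m : String) (vis : List String),
      (pvNu g vis + 2 ≤ f ∨ (m ∈ pvUniv g ∧ pvNu g vis + 1 ≤ f)) →
      pvDfsOk g m vis (pvDfsA g f m vis) := by
  intro f
  induction f with
  | zero => intro m vis h; omega
  | succ f IH =>
    intro m vis h
    by_cases hm : m ∈ vis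
    · rw [pvDfsA, if_pos hm]
      exact ⟨⟨[], by simp⟩, by simp, fun n hn hnv => absurd hn hnv,
        fun n hn hnv => absurd hn hnv, hm⟩
    · have hadd : PySem.Set.add vis m = vis ++ [m] := PySem.Set.add_of_not_mem hm
      have hν1 : pvNu g (vis ++ [m]) + 1 ≤ f := by
        rcases h with h | ⟨hmu, h⟩
        · have := pvNu_mono (g := g) (vis := vis) (vis' := vis ++ [m])
            (fun x hx => List.mem_append_left _ hx)
          omega
        · have := pvNu_add_lt (g := g) hmu hm
          omega
      have hfold := pvDfsA_fold g f IH (pvDirect g m) (pvDirect g m) (vis ++ [m])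
        (pv_direct_subset_univ g m) hν1
      obtain ⟨⟨new, h2⟩, he, hb, hc, hd, hg⟩ := hfold
      rw [pvDfsA, if_neg hm]
      simp only [hadd]
      refine ⟨⟨[m] ++ new, by rw [h2, List.append_assoc]⟩, ?_, ?_, ?_, ?_⟩
      · intro x hx
        rcases hb x hx with hx' | ⟨d', hd', ht⟩
        · exact Relation.TransGen.single hx'
        · exact Relation.TransGen.head hd' ht
      · intro n hn hnv
        by_cases hnm : n = m
        · exact Or.inl hnm
        · have hnv1 : n ∉ vis ++ [m] := by
            simp only [List.mem_append, List.mem_singleton]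
            rintro (h | h)
            · exact hnv h
            · exact hnm h
          rcases hc n hn hnv1 with ⟨d', hd', rfl⟩ | hnr
          · exact Or.inr (he n hd')
          · exact Or.inr hnr
      · intro n hn hnv y hy
        by_cases hnm : n = m
        · subst hnm
          exact hg y hy
        · have hnv1 : n ∉ vis ++ [m] := by
            simp only [List.mem_append, List.mem_singleton]
            rintro (h | h)
            · exact hnv h
            · exact hnm h
          exact hd n hn hnv1 y hy
      · rw [h2]
        exact List.mem_append_left _ (List.mem_append_right _ (by simp))

lemma pvCondA_iff (g : List (String × List String)) (U : List String) (m : String) :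
    (m ∈ U ∨ ((pvDfsA g (pvFuelA g) m []).1).any (fun d => decide (d ∈ U)) = true)
      ↔ pvReachU g U m := by
  have hf : pvNu g [] + 2 ≤ pvFuelA g := by
    have h1 : pvNu g [] ≤ (pvUniv g).length := by
      unfold pvNu
      exact le_trans (Finset.card_le_card Finset.sdiff_subset) (List.toFinset_card_le (pvUniv g))
    unfold pvFuelA
    unfold pvUniv at h1
    omega
  obtain ⟨⟨new, h2⟩, hb, hc, hd, hm⟩ := pvDfsA_spec g (pvFuelA g) m [] (Or.inl hf)
  constructor
  · rintro (hU | hany)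
    · exact ⟨m, hU, Relation.ReflTransGen.refl⟩
    · obtain ⟨d, hd', hdU⟩ := List.any_eq_true.mp hany
      exact ⟨d, by simpa using hdU, (hb d hd').to_reflTransGen⟩
  · rintro ⟨u, hu, hr⟩
    have hforward : ∀ z, Relation.ReflTransGen (pvStep g) m z → z ∈ (pvDfsA g (pvFuelA g) m []).2 := by
      intro z hz
      induction hz with
      | refl => exact hm
      | tail hab hbc => exact hd _ (by assumption) (by simp) _ hbc
    have hu2 := hforward u hr
    rcases hc u hu2 (by simp) with rfl | hur
    · exact Or.inl hu
    · exact Or.inr (List.any_eq_true.mpr ⟨u, hur, by simpa using hu⟩)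

-- ===== VERDICT (by name: the statement is the Claim_ definition above) =====
theorem get_all_used_measures_py_spec : Claim_equal_get_all_used_measures_py := by
  intro measures_dict used_in_visuals dep_graph _hDom
  unfold Spec_get_all_used_measures_py get_all_used_measures_py get_all_used_measures_py_alt
  have hnd : (PySem.Dict.ofList measures_dict).keys.Nodup := PySem.Dict.nodup_keys_ofList measures_dict
  rw [pv_foldl_add_filter (fun m => m ∈ used_in_visuals)
    (fun m => ((pvDfsA dep_graph (pvFuelA dep_graph) m []).1.any (fun d => decide (d ∈ used_in_visuals))) = true)
    _ [] hnd (by simp)]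
  rw [PySem.Set.ofList_eq_self_of_nodup _ (hnd.filter _)]
  simp only [List.nil_append]
  apply List.filter_congr
  intro m _hm
  rw [← Bool.decide_or]
  exact decide_eq_decide.mpr
    ((pvCondA_iff dep_graph used_in_visuals m).trans (pvMarked_iff dep_graph used_in_visuals m).symm)
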